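-- pv_equiv track=rewrite | github.com/siisi1324/RealSSAFY | practice/0211_str1/gns.py | solve
-- ===== SOURCE A (Python) =====
-- def solve(arr,N):
--     num_cnt_dict = {
--         'ZRO': 0,
--         'ONE': 0,
--         'TWO': 0,
--         'THR': 0,
--         'FOR': 0,
--         'FIV': 0,
--         'SIX': 0,
--         'SVN': 0,
--         'EGT': 0,
--         'NIN': 0
--     }
--     for i in range(N):
--         num_cnt_dict[arr[i]] += 1
--     sorted_list = []
--     for key in num_cnt_dict.keys():
--         sorted_list += [key]*num_cnt_dict[key]
--         # sorted_list.extend([key]*num_cnt_dict[key])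
--     return sorted_list
-- ===== SOURCE B (Python) =====
-- def solve(arr, N):
--     tokens = ['ZRO', 'ONE', 'TWO', 'THR', 'FOR', 'FIV', 'SIX', 'SVN', 'EGT', 'NIN']
--     return sorted((arr[i] for i in range(N)), key=tokens.index)
-- ===== Notes on version B (the rewrite author's own statement) =====
-- stated objective: idiomatic
-- what changed: Replaces the hand-written counting sort (a 10-key count dict rebuilt by concatenating replicated keys) with a one-line stable comparison sort of the first-N elements keyed by each token's index in the fixed token list.
import Mathlib
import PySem

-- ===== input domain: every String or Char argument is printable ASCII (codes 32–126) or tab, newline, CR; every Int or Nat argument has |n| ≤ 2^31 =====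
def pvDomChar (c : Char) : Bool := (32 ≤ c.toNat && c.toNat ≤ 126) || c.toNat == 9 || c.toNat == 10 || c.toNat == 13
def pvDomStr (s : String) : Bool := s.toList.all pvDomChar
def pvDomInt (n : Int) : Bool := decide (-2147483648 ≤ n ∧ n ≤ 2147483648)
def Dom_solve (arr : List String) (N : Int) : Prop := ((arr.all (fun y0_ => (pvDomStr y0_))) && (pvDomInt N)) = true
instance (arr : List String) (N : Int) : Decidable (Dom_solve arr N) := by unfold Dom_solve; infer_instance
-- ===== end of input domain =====

-- B replaces A's hand-written counting sort by a stable comparison sort of the first-N elements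
-- keyed by each token's index in the fixed token list (same return values on Pre_; idiomatic).


-- the ten number tokens, in A's dict-insertion order (= B's token-list order); used by Pre_solve
def pvTokens : List String :=
  ["ZRO", "ONE", "TWO", "THR", "FOR", "FIV", "SIX", "SVN", "EGT", "NIN"]

-- ===== PORT A =====
def solve (arr : List String) (N : Int) : List String :=
  let num_cnt_dict : PySem.Dict String Int :=
    PySem.Dict.ofList [("ZRO", 0), ("ONE", 0), ("TWO", 0), ("THR", 0), ("FOR", 0),
                       ("FIV", 0), ("SIX", 0), ("SVN", 0), ("EGT", 0), ("NIN", 0)]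
  -- for i in range(N): num_cnt_dict[arr[i]] += 1
  -- (arr[i] is in range and is a dict key under Pre_solve; outside it Python raises)
  let d := (PySem.List.pyRange 0 N 1).foldl
    (fun d i => d.modify (PySem.List.pyGetD arr i "") 0 (· + 1)) num_cnt_dict
  -- for key in num_cnt_dict.keys(): sorted_list += [key]*num_cnt_dict[key]
  d.keys.foldl (fun sorted_list key => sorted_list ++ List.replicate (d.getD key 0).toNat key) []

-- ===== PORT B =====
def solve_alt (arr : List String) (N : Int) : List String :=
  -- sorted((arr[i] for i in range(N)), key=tokens.index)  (tokens.index x defined under Pre_solve)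
  PySem.List.sorted ((PySem.List.pyRange 0 N 1).map (fun i => PySem.List.pyGetD arr i ""))
    (fun x => (PySem.List.index? pvTokens x).getD 0) false

-- ===== PRECONDITION & SPEC =====
-- Pre_ excludes exactly the inputs where A raises: N > len(arr) (IndexError) or a first-N
-- element outside the ten tokens (KeyError); A returns normally on every other input.
def Pre_solve (arr : List String) (N : Int) : Prop :=
  N ≤ (arr.length : Int) ∧ ∀ x ∈ arr.take N.toNat, x ∈ pvTokens
instance (arr : List String) (N : Int) : Decidable (Pre_solve arr N) := by
  unfold Pre_solve; infer_instance
def pvWitness_solve : List String × Int := (["ONE", "ZRO", "NIN", "ONE"], 4)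

def Spec_solve (arr : List String) (N : Int) (out : List String) : Prop := out = solve_alt arr N
instance (arr : List String) (N : Int) (out : List String) : Decidable (Spec_solve arr N out) := by
  unfold Spec_solve; infer_instance

-- ===== CLAIM (what is proved, stated in full; the proofs are below) =====
def Claim_equal_solve : Prop := ∀ (arr : List String) (N : Int),
  Dom_solve arr N → Pre_solve arr N → Spec_solve arr N (solve arr N)

-- ===== LEMMAS AND PROOFS =====

-- B's rank function, as a named helper for the proofs (definitionally solve_alt's key)
def pvKey (x : String) : Nat := (PySem.List.index? pvTokens x).getD 0

-- the common canonical result: tokens in rank order, each repeated by its prefix count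
def pvCanon (lst : List String) : List String :=
  pvTokens.flatMap (fun k => List.replicate (lst.count k) k)

-- B's generator (arr[i] for i in range(N)) yields the first-N prefix of arr
lemma pvPrefix_eq (arr : List String) (N : Int) (h : N ≤ (arr.length : Int)) :
    (PySem.List.pyRange 0 N 1).map (fun i => PySem.List.pyGetD arr i "") = arr.take N.toNat := by
  rw [PySem.List.pyRange_one]
  apply List.ext_getElem
  · simp; omega
  · intro k h1 h2
    simp only [List.getElem_map, List.getElem_range, List.getElem_take]
    rw [zero_add, PySem.List.pyGetD_natCast]
    simp only [List.length_map, List.length_range] at h1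
    exact List.getD_eq_getElem arr "" (by omega)

lemma canon_count (lst : List String) (h : ∀ x ∈ lst, x ∈ pvTokens) (s : String) :
    (pvCanon lst).count s = lst.count s := by
  by_cases hs : s ∈ pvTokens
  · unfold pvCanon pvTokens
    simp only [List.flatMap_cons, List.flatMap_nil, List.count_append, List.count_replicate,
      List.append_nil]
    fin_cases hs <;> simp
  · have h0 : lst.count s = 0 := List.count_eq_zero.mpr (fun hm => hs (h s hm))
    rw [h0]
    unfold pvCanon pvTokens at *
    simp only [List.flatMap_cons, List.flatMap_nil, List.count_append, List.count_replicate,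
      List.append_nil]
    simp
    refine ⟨?_, ?_, ?_, ?_, ?_, ?_, ?_, ?_, ?_, ?_⟩ <;> (rintro rfl; simp at hs)

lemma pairwise_flatMap_replicate {α : Type} {κ : Type} [Preorder κ] (key : α → κ) (f : α → Nat) :
    ∀ ts : List α, ts.Pairwise (fun a b => key a ≤ key b) →
      (ts.flatMap (fun k => List.replicate (f k) k)).Pairwise (fun a b => key a ≤ key b) := by
  intro ts hp
  induction ts with
  | nil => simp
  | cons t rest ih =>
    rw [List.pairwise_cons] at hp
    rw [List.flatMap_cons, List.pairwise_append]
    refine ⟨List.pairwise_replicate.mpr (Or.inr le_rfl), ih hp.2, ?_⟩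
    intro a ha b hb
    obtain ⟨-, rfl⟩ := List.mem_replicate.mp ha
    obtain ⟨k, hk, hbk⟩ := List.mem_flatMap.mp hb
    obtain ⟨-, rfl⟩ := List.mem_replicate.mp hbk
    exact hp.1 _ hk

lemma canon_pairwise (lst : List String) :
    (pvCanon lst).Pairwise (fun a b => pvKey a ≤ pvKey b) := by
  exact pairwise_flatMap_replicate pvKey (fun k => lst.count k) pvTokens (by decide)

-- two key-sorted lists that are permutations of each other, with the key injective on their
-- elements, are equal (so stability is irrelevant here: equal keys force equal elements)
lemma perm_sorted_unique {α : Type} {κ : Type} [LinearOrder κ] (key : α → κ) :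
    ∀ (l₁ l₂ : List α), l₁.Perm l₂ →
      l₁.Pairwise (fun a b => key a ≤ key b) → l₂.Pairwise (fun a b => key a ≤ key b) →
      (∀ a ∈ l₁, ∀ b ∈ l₁, key a = key b → a = b) → l₁ = l₂ := by
  intro l₁
  induction l₁ with
  | nil => intro l₂ hp _ _ _; exact (List.Perm.nil_eq hp).symm ▸ rfl
  | cons a t ih =>
    intro l₂ hp h1 h2 hinj
    cases l₂ with
    | nil => exact absurd hp.symm (by simp)
    | cons b t₂ =>
      rw [List.pairwise_cons] at h1 h2
      have hb1 : b ∈ a :: t := hp.symm.subset (List.mem_cons_self)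
      have ha2 : a ∈ b :: t₂ := hp.subset (List.mem_cons_self)
      have hab : key a ≤ key b := by
        rcases List.mem_cons.mp hb1 with rfl | hb
        · exact le_rfl
        · exact h1.1 b hb
      have hba : key b ≤ key a := by
        rcases List.mem_cons.mp ha2 with rfl | hTail
        · exact le_rfl
        · exact h2.1 a hTail
      have heq : a = b := hinj a List.mem_cons_self b hb1 (le_antisymm hab hba)
      subst heq
      have ht : t.Perm t₂ := hp.cons_inv
      have := ih t₂ ht h1.2 h2.2
        (fun x hx y hy hxy => hinj x (List.mem_cons_of_mem a hx) y (List.mem_cons_of_mem a hy) hxy)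
      rw [this]

lemma solve_alt_eq_canon (arr : List String) (N : Int) (hN : N ≤ (arr.length : Int))
    (h : ∀ x ∈ arr.take N.toNat, x ∈ pvTokens) :
    solve_alt arr N = pvCanon (arr.take N.toNat) := by
  set lst := arr.take N.toNat with hlst
  have hpre : solve_alt arr N = PySem.List.sorted lst pvKey false := by
    unfold solve_alt
    rw [pvPrefix_eq arr N hN]
    rfl
  rw [hpre]
  have hperm : (PySem.List.sorted lst pvKey false).Perm (pvCanon lst) := by
    refine (PySem.List.sorted_perm lst pvKey false).trans ?_
    rw [List.perm_iff_count]
    intro s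
    exact (canon_count lst h s).symm
  refine perm_sorted_unique pvKey _ _ hperm (PySem.List.sorted_pairwise lst pvKey)
    (canon_pairwise lst) ?_
  intro a ha b hb hk
  have ha' : a ∈ pvTokens := h a ((PySem.List.mem_sorted _ _ _ _).mp ha)
  have hb' : b ∈ pvTokens := h b ((PySem.List.mem_sorted _ _ _ _).mp hb)
  fin_cases ha' <;> fin_cases hb' <;> first | rfl | (exfalso; revert hk; decide)

lemma solve_eq_canon (arr : List String) (N : Int) (hN : N ≤ (arr.length : Int))
    (h : ∀ x ∈ arr.take N.toNat, x ∈ pvTokens) :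
    solve arr N = pvCanon (arr.take N.toNat) := by
  set lst := arr.take N.toNat with hlst
  unfold solve
  simp only
  rw [← List.foldl_map (f := fun i => PySem.List.pyGetD arr i "")
    (g := fun d x => PySem.Dict.modify d x 0 (· + 1)), pvPrefix_eq arr N hN]
  set d0 : PySem.Dict String Int :=
    PySem.Dict.ofList [("ZRO", 0), ("ONE", 0), ("TWO", 0), ("THR", 0), ("FOR", 0),
                       ("FIV", 0), ("SIX", 0), ("SVN", 0), ("EGT", 0), ("NIN", 0)] with hd0
  have hzero : ∀ v : String, d0.getD v 0 = 0 := by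
    intro v
    have : d0 = PySem.Dict.mk [("ZRO", 0), ("ONE", 0), ("TWO", 0), ("THR", 0), ("FOR", 0),
        ("FIV", 0), ("SIX", 0), ("SVN", 0), ("EGT", 0), ("NIN", 0)] := by decide
    rw [this]
    simp only [PySem.Dict.getD_eq_get?_getD, PySem.Dict.get?_mk_cons]
    split_ifs <;> rfl
  have hkeys0 : d0.keys = pvTokens := by decide
  have hgetD : ∀ v, (List.foldl (fun d x => d.modify x 0 (· + 1)) d0 lst).getD v 0
      = ((List.count v lst : Nat) : Int) := by
    intro v
    rw [PySem.Dict.getD_foldl_modify_add_one, hzero, zero_add]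
  have hkeys : (List.foldl (fun d x => d.modify x 0 (· + 1)) d0 lst).keys = pvTokens := by
    rw [PySem.Dict.keys_foldl_modify lst 0 (fun _ _ v => v + 1) d0, hkeys0,
      PySem.Set.update_eq_append_filter]
    have : List.filter (fun y => !(PySem.Set.contains pvTokens y)) (PySem.Set.ofList lst) = [] := by
      rw [List.filter_eq_nil_iff]
      intro y hy
      have hmem : y ∈ pvTokens := h y ((PySem.Set.mem_ofList _ _).mp hy)
      simpa using hmem
    rw [this, List.append_nil]
  rw [hkeys]
  rw [PySem.List.foldl_append_eq_flatMap, List.nil_append]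
  unfold pvCanon
  congr 1
  funext k
  rw [hgetD k, Int.toNat_natCast]

-- ===== VERDICT (by name: the statement is the Claim_ definition above) =====
theorem solve_spec : Claim_equal_solve := by
  intro arr N _ hpre
  unfold Spec_solve
  rw [solve_eq_canon arr N hpre.1 hpre.2, solve_alt_eq_canon arr N hpre.1 hpre.2]
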